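-- pv_equiv track=rewrite | github.com/mackot1337/Jezyki-Skryptowe | lab2/questionsAndExclamations_3h.py | process_3h
-- ===== SOURCE A (Python) =====
-- def process_3h(sentence):
--     # Logika sprawdzająca pytania/wykrzykniki
--     last_char = ""
--     for c in sentence:
--         if c not in " \t\n\r":
--             last_char = c
--     if last_char in "?!":
--         return sentence
--     return ""
-- ===== SOURCE B (Python) =====
-- def process_3h(sentence):
--     # Scan from the end: the first non-whitespace char seen decides everything.
--     for c in reversed(sentence):
--         if c in "?!":
--             return sentence
--         if c not in " \t\n\r":
--             return ""
--     return ""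
-- ===== Notes on version B (the rewrite author's own statement) =====
-- stated objective: alternative
-- what changed: Replaces A's forward full scan with a mutable last-char accumulator by a backward scan over reversed(sentence) that early-exits at the first non-whitespace character.
-- intended difference: On non-empty all-whitespace inputs A returns the sentence itself (because Python's '' in "?!" is True), while B returns "", which is intended since such a sentence does not end in ? or !. — e.g. on process_3h(" "): A returns " ", B returns ""
import Mathlib
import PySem

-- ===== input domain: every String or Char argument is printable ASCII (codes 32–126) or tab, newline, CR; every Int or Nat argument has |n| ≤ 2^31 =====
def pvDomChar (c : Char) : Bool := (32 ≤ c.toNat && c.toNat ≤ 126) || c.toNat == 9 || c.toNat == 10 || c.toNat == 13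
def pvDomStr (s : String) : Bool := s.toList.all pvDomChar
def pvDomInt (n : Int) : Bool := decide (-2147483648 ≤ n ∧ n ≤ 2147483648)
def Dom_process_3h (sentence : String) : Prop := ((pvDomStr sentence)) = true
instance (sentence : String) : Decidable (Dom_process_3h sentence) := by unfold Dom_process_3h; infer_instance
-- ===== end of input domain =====

-- B replaces A's forward accumulator scan with a backward early-exit scan (alternative decomposition).

-- ===== PORT A =====
-- last_char is a Python string, "" initially then a single char: modeled as Option Char.
-- Python's '"" in "?!"' is True, so the none case returns the sentence.
def process_3h (sentence : String) : String :=
  let last := sentence.toList.foldl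
    (fun acc c => if (" \t\n\r".toList.contains c) then acc else some c) (none : Option Char)
  match last with
  | none => sentence
  | some c => if ("?!".toList.contains c) then sentence else ""

-- ===== PORT B =====
-- B's early-exit for-loop over reversed(sentence), as structural recursion:
-- first char decides (return sentence / return ""), whitespace recurses, exhaustion returns "".
def pvBackScan (s : String) : List Char → String
  | [] => ""
  | c :: rest =>
    if ("?!".toList.contains c) then s
    else if (" \t\n\r".toList.contains c) then pvBackScan s rest
    else ""

def process_3h_alt (sentence : String) : String :=
  pvBackScan sentence sentence.toList.reverse

-- ===== PRECONDITION & SPEC =====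
-- On non-empty all-whitespace inputs A returns the sentence itself (Python's '' in "?!" is True),
-- while B returns "", which is intended since such a sentence does not end in ? or !.
def D_process_3h (sentence : String) : Prop :=
  sentence ≠ "" ∧ sentence.toList.all (fun c => " \t\n\r".toList.contains c) = true
instance (sentence : String) : Decidable (D_process_3h sentence) := by unfold D_process_3h; infer_instance

def Spec_process_3h (sentence : String) (out : String) : Prop :=
  ¬ D_process_3h sentence → out = process_3h_alt sentence
instance (sentence : String) (out : String) : Decidable (Spec_process_3h sentence out) := by unfold Spec_process_3h; infer_instance

def pvDiffWitness_process_3h : String := " "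
def pvDiffWitnessOut_process_3h : String × String := (" ", "")

-- ===== CLAIM =====
def Claim_unchanged_process_3h : Prop := ∀ (sentence : String), Dom_process_3h sentence → Spec_process_3h sentence (process_3h sentence)
def Claim_changed_process_3h : Prop := Dom_process_3h (pvDiffWitness_process_3h) ∧ D_process_3h (pvDiffWitness_process_3h) ∧ process_3h (pvDiffWitness_process_3h) = pvDiffWitnessOut_process_3h.1 ∧ process_3h_alt (pvDiffWitness_process_3h) = pvDiffWitnessOut_process_3h.2 ∧ pvDiffWitnessOut_process_3h.1 ≠ pvDiffWitnessOut_process_3h.2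
def Claim_exact_process_3h : Prop := ∀ (sentence : String), Dom_process_3h sentence → D_process_3h sentence → process_3h sentence ≠ process_3h_alt sentence

-- ===== LEMMAS AND PROOFS =====

-- A's fold keeps the last non-whitespace char = head of the whitespace-stripped reverse.
theorem pv_foldl_last (l : List Char) (acc : Option Char) :
    l.foldl (fun a c => if (" \t\n\r".toList.contains c) then a else some c) acc
      = ((l.reverse.dropWhile (fun c => " \t\n\r".toList.contains c)).head?).or acc := by
  induction l generalizing acc with
  | nil => simp
  | cons c t ih =>
    simp only [List.foldl_cons, ih, List.reverse_cons, List.dropWhile_append]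
    cases h : (t.reverse.dropWhile (fun c => " \t\n\r".toList.contains c)) with
    | nil => simp only [List.isEmpty_nil, if_true, List.dropWhile_cons, List.dropWhile_nil]
             split_ifs with hc <;> simp
    | cons x xs => simp

-- B's backward scan as a function of the first non-whitespace char of its argument.
theorem pv_backScan_eq (s : String) (l : List Char) :
    pvBackScan s l
      = match (l.dropWhile (fun c => " \t\n\r".toList.contains c)).head? with
        | none => ""
        | some c => if ("?!".toList.contains c) then s else "" := by
  induction l with
  | nil => simp [pvBackScan]
  | cons c t ih =>
    by_cases hq : c = '?' ∨ c = '!'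
    · have hw : ¬ (c = ' ' ∨ c = '\t' ∨ c = '\n' ∨ c = '\r') := by
        rcases hq with h | h <;> subst h <;> decide
      simp [pvBackScan, hq, hw]
    · by_cases hw : c = ' ' ∨ c = '\t' ∨ c = '\n' ∨ c = '\r'
      · simpa [pvBackScan, List.dropWhile_cons, hq, hw] using ih
      · simp [pvBackScan, hq, hw]

-- ===== VERDICT =====
theorem process_3h_spec : Claim_unchanged_process_3h := by
  intro sentence _ hnD
  simp only [process_3h, process_3h_alt, pv_foldl_last, pv_backScan_eq, Option.or_none]
  cases h : (sentence.toList.reverse.dropWhile (fun c => " \t\n\r".toList.contains c)).head? with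
  | some c => rfl
  | none =>
    have hall : sentence.toList.all (fun c => " \t\n\r".toList.contains c) = true := by
      rw [List.head?_eq_none_iff, List.dropWhile_eq_nil_iff] at h
      simp only [List.all_eq_true]
      intro c hc
      exact h c (List.mem_reverse.mpr hc)
    have : sentence = "" := by
      by_contra hne
      exact hnD ⟨hne, hall⟩
    simp [this]

theorem process_3h_changed : Claim_changed_process_3h := by unfold Claim_changed_process_3h; decide

theorem process_3h_tight : Claim_exact_process_3h := by
  intro sentence _ hD
  obtain ⟨hne, hall⟩ := hD
  have hdw : (sentence.toList.reverse.dropWhile (fun c => " \t\n\r".toList.contains c)) = [] := by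
    rw [List.dropWhile_eq_nil_iff]
    intro c hc
    exact (List.all_eq_true.mp hall) c (List.mem_reverse.mp hc)
  simp only [process_3h, process_3h_alt, pv_foldl_last, pv_backScan_eq, hdw]
  simpa using hne
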